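-- pv_equiv track=rewrite | github.com/momok47/kokoronia | src/core/feedback/turn_segmentation.py | segment_turns
-- ===== SOURCE A (Python) =====
-- from typing import Dict, List, Tuple
--
-- def segment_turns(dialogue: List[Dict]) -> Tuple[List[List[Dict]], List[List[Dict]], int]:
--     """
--     会話をターンごとに分割する
--
--     Args:
--         dialogue: 会話データのリスト [{'role': 'counselor', 'utterance': '...'}, ...]
--
--     Returns:
--         counselor_turns: counselorの連続発話グループのリスト
--         client_turns: clientの連続発話グループのリスト
--         max_turns: 作成される論理ターン数
--     """
--     # 同じroleの連続発話をまとめる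
--     counselor_turns = []
--     client_turns = []
--
--     # 同じroleの連続発話をまとめる
--     current_role = None
--     current_turns = []
--
--     for turn in dialogue:
--         role = turn['role']
--
--         if current_role is None:
--             # 最初の発話
--             current_role = role
--             current_turns = [turn]
--         elif role == current_role:
--             # 同じroleの連続発話
--             current_turns.append(turn)
--         else:
--             # roleが変わった場合、前のターンを処理
--             if current_role == 'counselor':
--                 counselor_turns.append(current_turns)
--             elif current_role == 'client':
--                 client_turns.append(current_turns)
--
--             # 新しいroleを開始
--             current_role = role
--             current_turns = [turn]
--
--     # 最後のターンを処理
--     if current_turns: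
--         if current_role == 'counselor':
--             counselor_turns.append(current_turns)
--         elif current_role == 'client':
--             client_turns.append(current_turns)
--
--     max_turns = max(len(counselor_turns), len(client_turns))
--
--     return counselor_turns, client_turns, max_turns
-- ===== SOURCE B (Python) =====
-- from typing import Dict, List, Tuple
--
-- def segment_turns(dialogue: List[Dict]) -> Tuple[List[List[Dict]], List[List[Dict]], int]:
--     """Two-pointer run scanner: find each maximal run of equal roles by index, slice it out."""
--     counselor_turns = []
--     client_turns = []
--     i, n = 0, len(dialogue)
--     while i < n:
--         role = dialogue[i]['role']
--         j = i
--         while j < n and dialogue[j]['role'] == role: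
--             j += 1
--         run = dialogue[i:j]
--         if role == 'counselor':
--             counselor_turns.append(run)
--         elif role == 'client':
--             client_turns.append(run)
--         i = j
--     return counselor_turns, client_turns, max(len(counselor_turns), len(client_turns))
-- ===== Notes on version B (the rewrite author's own statement) =====
-- stated objective: alternative
-- what changed: Replaced A's current_role/current_turns state machine with explicit trailing flush by a two-pointer scan that finds each maximal same-role run directly and appends its slice, keeping no cross-iteration accumulator state.
import Mathlib
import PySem

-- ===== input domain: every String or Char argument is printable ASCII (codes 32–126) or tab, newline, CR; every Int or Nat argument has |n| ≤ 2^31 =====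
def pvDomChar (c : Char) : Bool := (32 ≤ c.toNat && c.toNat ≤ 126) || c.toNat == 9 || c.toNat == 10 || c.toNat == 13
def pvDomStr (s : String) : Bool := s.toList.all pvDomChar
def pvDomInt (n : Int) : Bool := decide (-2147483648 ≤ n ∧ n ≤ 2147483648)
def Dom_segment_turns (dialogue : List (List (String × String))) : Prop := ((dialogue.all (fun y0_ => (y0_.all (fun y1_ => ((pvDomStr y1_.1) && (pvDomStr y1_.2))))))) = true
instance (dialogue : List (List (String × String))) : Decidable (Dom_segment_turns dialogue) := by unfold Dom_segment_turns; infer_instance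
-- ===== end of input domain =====

-- B replaces A's current_role/current_turns accumulator state machine with a two-pointer scan
-- that slices out each maximal same-role run directly (objective: alternative, same cost).

-- turn['role'] ; the .getD "" default is unreachable inside Pre_ (where the key exists)
def lookRole (t : List (String × String)) : String :=
  ((PySem.Dict.mk t).get? "role").getD ""

-- ===== PORT A =====
-- the two elif-dispatch blocks of A (flush current_turns into the right list)
def dispatchA (r : Option String) (cur : List (List (String × String)))
    (ct cl : List (List (List (String × String)))) :
    List (List (List (String × String))) × List (List (List (String × String))) :=
  if r = some "counselor" then (ct ++ [cur], cl)
  else if r = some "client" then (ct, cl ++ [cur])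
  else (ct, cl)

def stepA (st : List (List (List (String × String))) × List (List (List (String × String))) × Option String × List (List (String × String))) (turn : List (String × String)) :
    List (List (List (String × String))) × List (List (List (String × String))) × Option String × List (List (String × String)) :=
  let (ct, cl, cr, cur) := st
  let role := lookRole turn
  match cr with
  | none => (ct, cl, some role, [turn])
  | some r =>
    if role = r then (ct, cl, some r, cur ++ [turn])
    else
      let p := dispatchA (some r) cur ct cl
      (p.1, p.2, some role, [turn])

-- the final 'if current_turns:' flush
def finA (st : List (List (List (String × String))) × List (List (List (String × String))) × Option String × List (List (String × String))) :
    List (List (List (String × String))) × List (List (List (String × String))) :=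
  let (ct, cl, cr, cur) := st
  if cur ≠ [] then dispatchA cr cur ct cl else (ct, cl)

def segment_turns (dialogue : List (List (String × String))) : (List (List (List (String × String)))) × (List (List (List (String × String)))) × Int :=
  let p := finA (dialogue.foldl stepA ([], [], none, []))
  (p.1, p.2, ((max p.1.length p.2.length : Nat) : Int))

-- ===== PORT B =====
-- Source B's inner 'while j < n and dialogue[j]['role'] == role' index scan, as structural
-- recursion over the remaining suffix: returns (the run dialogue[i:j] past the head, the rest)
def takeRun (role : String) : List (List (String × String)) → List (List (String × String)) × List (List (String × String))
  | [] => ([], [])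
  | t :: ts =>
    if lookRole t = role then
      let p := takeRun role ts
      (t :: p.1, p.2)
    else ([], t :: ts)

theorem takeRun_len (role : String) (ts : List (List (String × String))) :
    (takeRun role ts).2.length ≤ ts.length := by
  induction ts with
  | nil => simp [takeRun]
  | cons t ts ih =>
    simp only [takeRun]
    split
    · exact Nat.le_succ_of_le ih
    · simp

-- Source B's outer while loop over i: one iteration per maximal run
def segB : List (List (String × String)) → List (List (List (String × String))) × List (List (List (String × String)))
  | [] => ([], [])
  | t :: ts =>
    let role := lookRole t
    let p := takeRun role ts
    let rest := segB p.2
    if role = "counselor" then ((t :: p.1) :: rest.1, rest.2)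
    else if role = "client" then (rest.1, (t :: p.1) :: rest.2)
    else rest
termination_by l => l.length
decreasing_by
  simpa using Nat.lt_succ_of_le (takeRun_len _ _)

def segment_turns_alt (dialogue : List (List (String × String))) : (List (List (List (String × String)))) × (List (List (List (String × String)))) × Int :=
  let p := segB dialogue
  (p.1, p.2, ((max p.1.length p.2.length : Nat) : Int))

-- ===== PRECONDITION & SPEC =====
-- Pre_ excludes dialogues containing a turn without a 'role' key: Python A raises KeyError there (B too).
def Pre_segment_turns (dialogue : List (List (String × String))) : Prop :=
  ∀ t ∈ dialogue, "role" ∈ t.map Prod.fst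

instance (dialogue : List (List (String × String))) : Decidable (Pre_segment_turns dialogue) := by unfold Pre_segment_turns; infer_instance

def pvWitness_segment_turns : (List (List (String × String))) :=
  [[("role", "counselor"), ("utterance", "hi")], [("role", "client"), ("utterance", "hello")]]

def Spec_segment_turns (dialogue : List (List (String × String))) (out : (List (List (List (String × String)))) × (List (List (List (String × String)))) × Int) : Prop := out = segment_turns_alt dialogue
instance (dialogue : List (List (String × String))) (out : (List (List (List (String × String)))) × (List (List (List (String × String)))) × Int) : Decidable (Spec_segment_turns dialogue out) := by unfold Spec_segment_turns; infer_instance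

-- ===== CLAIM (what is proved, stated in full; the proofs are below) =====
def Claim_equal_segment_turns : Prop := ∀ (dialogue : List (List (String × String))), Dom_segment_turns dialogue → Pre_segment_turns dialogue → Spec_segment_turns dialogue (segment_turns dialogue)

-- ===== LEMMAS AND PROOFS =====

-- invariant: once A's state carries role r and nonempty buffer cur, finishing the fold equals
-- extending cur by the maximal r-run, flushing it, and running B on the remainder
theorem foldA_eq (ts : List (List (String × String))) :
    ∀ (r : String) (cur : List (List (String × String))) (ct cl : List (List (List (String × String)))),
    cur ≠ [] →
    finA (ts.foldl stepA (ct, cl, some r, cur)) =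
      (let p := takeRun r ts
       let d := dispatchA (some r) (cur ++ p.1) ct cl
       let q := segB p.2
       (d.1 ++ q.1, d.2 ++ q.2)) := by
  induction ts with
  | nil =>
    intro r cur ct cl hcur
    simp only [List.foldl_nil, takeRun, segB, finA]
    simp [hcur, dispatchA]
  | cons t ts ih =>
    intro r cur ct cl hcur
    by_cases h : lookRole t = r
    · have hstep : stepA (ct, cl, some r, cur) t = (ct, cl, some r, cur ++ [t]) := by
        simp [stepA, h]
      rw [List.foldl_cons, hstep, ih r (cur ++ [t]) ct cl (by simp)]
      simp only [takeRun, h]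
      simp [List.append_assoc]
    · have hstep : stepA (ct, cl, some r, cur) t =
          ((dispatchA (some r) cur ct cl).1, (dispatchA (some r) cur ct cl).2,
            some (lookRole t), [t]) := by
        simp [stepA, h]
      rw [List.foldl_cons, hstep,
        ih (lookRole t) [t] (dispatchA (some r) cur ct cl).1 (dispatchA (some r) cur ct cl).2 (by simp)]
      have htr : takeRun r (t :: ts) = ([], t :: ts) := by simp [takeRun, h]
      rw [htr]
      simp only [List.append_nil, segB]
      by_cases hc : lookRole t = "counselor"
      · simp [hc, dispatchA, List.append_assoc]
      · by_cases hl : lookRole t = "client"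
        · simp [hl, dispatchA, List.append_assoc]
        · simp [hc, hl, dispatchA]

-- ===== VERDICT (by name: the statement is the Claim_ definition above) =====
theorem segment_turns_spec : Claim_equal_segment_turns := by
  intro dialogue _ _
  unfold Spec_segment_turns segment_turns segment_turns_alt
  cases dialogue with
  | nil => simp [finA, segB]
  | cons t ts =>
    have hstep : stepA ([], [], none, []) t = ([], [], some (lookRole t), [t]) := by
      simp [stepA]
    have h := foldA_eq ts (lookRole t) [t] [] [] (by simp)
    rw [List.foldl_cons, hstep, h]
    simp only [segB]
    by_cases hc : lookRole t = "counselor"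
    · simp [hc, dispatchA]
    · by_cases hl : lookRole t = "client"
      · simp [hl, dispatchA]
      · simp [hc, hl, dispatchA]
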